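-- pv_equiv track=rewrite | github.com/yuelfei/NNBA | boundary_assembly_Lite/yuefei_utils.py | match_entity
-- ===== SOURCE A (Python) =====
-- def match_entity(B_label,E_label):
--     true_entity_type=[]
--     true_entity_index=[]
--     for B_label_node,E_label_node in zip(B_label,E_label):
--         B_node_temp = []
--         B_node_index=[]
--         for B_sub,B_sub_index in zip(B_label_node,range(len(B_label_node))):
--             if('B' in B_sub):
--                 B_node_temp.append(B_sub)
--                 B_node_index.append(B_sub_index)
--
--         E_node_temp = []
--         E_node_index = []
--         for E_sub, E_sub_index in zip(E_label_node, range(len(E_label_node))):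
--             if ('B' in E_sub):
--                 E_node_temp.append(E_sub)
--                 E_node_index.append(E_sub_index)
--         if(len(E_node_temp)==0):
--             true_entity_type.append([])
--             true_entity_index.append([])
--             continue
--         match_index=[]
--         match_type=[]
--         for E_match,E_match_index in zip(E_node_temp,E_node_index):
--             corrent_list=str(E_match).strip().replace("B-","").split(",")
--             for B_match,B_match_index in zip(B_node_temp,B_node_index):
--                 if(corrent_list[0] in B_match):
--                     match_index.append([B_match_index,E_match_index])
--                     match_type.append(corrent_list[-1])
--
--         true_entity_type.append(match_type)
--         true_entity_index.append(match_index)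
--         match_index = []
--         match_type = []
--     return true_entity_type,true_entity_index
-- ===== SOURCE B (Python) =====
-- def match_entity(B_label, E_label):
--     true_entity_type = []
--     true_entity_index = []
--     for B_node, E_node in zip(B_label, E_label):
--         B_entries = [(i, s) for i, s in enumerate(B_node) if 'B' in s]
--         E_entries = [(j, s) for j, s in enumerate(E_node) if 'B' in s]
--         if not E_entries:
--             true_entity_type.append([])
--             true_entity_index.append([])
--             continue
--         cache = {}
--         match_index = []
--         match_type = []
--         for j, e in E_entries:
--             parts = e.strip().replace("B-", "").split(",")
--             key = parts[0]
--             if key not in cache: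
--                 cache[key] = [i for i, b in B_entries if key in b]
--             t = parts[-1]
--             for i in cache[key]:
--                 match_index.append([i, j])
--                 match_type.append(t)
--         true_entity_type.append(match_type)
--         true_entity_index.append(match_index)
--     return true_entity_type, true_entity_index
-- ===== Notes on version B (the rewrite author's own statement) =====
-- stated objective: alternative
-- what changed: Per sentence, B builds the (index, label) entry lists once by filtered enumeration and memoizes in a dict, per distinct E-key, the ordered list of matching B-indices, so A's inner rescan of all B-entries is skipped for repeated keys.
import Mathlib
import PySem

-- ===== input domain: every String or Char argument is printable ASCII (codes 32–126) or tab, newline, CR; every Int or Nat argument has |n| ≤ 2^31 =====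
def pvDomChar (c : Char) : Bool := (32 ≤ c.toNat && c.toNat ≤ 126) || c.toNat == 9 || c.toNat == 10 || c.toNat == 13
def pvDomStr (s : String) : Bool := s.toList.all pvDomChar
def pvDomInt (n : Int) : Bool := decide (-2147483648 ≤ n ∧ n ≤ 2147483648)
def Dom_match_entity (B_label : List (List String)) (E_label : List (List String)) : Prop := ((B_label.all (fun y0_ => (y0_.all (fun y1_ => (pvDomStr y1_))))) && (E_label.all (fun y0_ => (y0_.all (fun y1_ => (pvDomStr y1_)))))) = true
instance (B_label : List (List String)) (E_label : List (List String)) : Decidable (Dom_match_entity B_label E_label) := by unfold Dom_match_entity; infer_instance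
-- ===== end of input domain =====

-- B memoizes, per distinct E-key, the ordered list of matching B-indices in a dict, replacing A's
-- rescan of all B-entries for every E-entry; equivalence of the return values is proved below.

-- ===== PORT A =====

-- the two parallel-list collecting loops of A ('B' in label → keep label and its index)
def matchA_collect (node : List String) : List String × List Int :=
  (PySem.List.enumerate node 0).foldl
    (fun acc p => if PySem.Str.isIn "B" p.2 then (acc.1 ++ [p.2], acc.2 ++ [p.1]) else acc)
    ([], [])

-- e.strip().replace("B-","").split(",") — used by both ports; split? is always `some`
-- here since the separator "," is nonempty, so the .getD [] default is never taken
def pvParts (e : String) : List String :=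
  (PySem.Str.split? (PySem.Str.replace (PySem.Str.strip e) "B-" "") ",").getD []

-- A's nested matching loops: for each kept E label, rescan all kept B labels
def matchA_inner (Bt : List String) (Bi : List Int) (Et : List String) (Ei : List Int) :
    List (List Int) × List String :=
  (Et.zip Ei).foldl
    (fun acc pe =>
      let corrent := pvParts pe.1
      (Bt.zip Bi).foldl
        (fun acc2 pb =>
          if PySem.Str.isIn (PySem.List.pyGetD corrent 0 "") pb.1 then
            (acc2.1 ++ [[pb.2, pe.2]], acc2.2 ++ [PySem.List.pyGetD corrent (-1) ""])
          else acc2)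
        acc)
    ([], [])

-- one iteration of A's outer loop (the 'continue' branch is the then-branch)
def matchA_sentence (Bn En : List String) : List String × List (List Int) :=
  let bc := matchA_collect Bn
  let ec := matchA_collect En
  if ec.1.length = 0 then ([], [])
  else
    let r := matchA_inner bc.1 bc.2 ec.1 ec.2
    (r.2, r.1)

def match_entity (B_label : List (List String)) (E_label : List (List String)) :
    List (List String) × List (List (List Int)) :=
  (B_label.zip E_label).foldl
    (fun acc pn =>
      let s := matchA_sentence pn.1 pn.2
      (acc.1 ++ [s.1], acc.2 ++ [s.2]))
    ([], [])

-- ===== PORT B =====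

-- [(i, s) for i, s in enumerate(node) if 'B' in s]
def matchB_entries (node : List String) : List (Int × String) :=
  (PySem.List.enumerate node 0).filter (fun p => PySem.Str.isIn "B" p.2)

-- [i for i, b in B_entries if key in b]   (computed once per distinct key)
def matchB_lookup (Bs : List (Int × String)) (key : String) : List Int :=
  (Bs.filter (fun q => PySem.Str.isIn key q.2)).map (·.1)

-- one iteration of B's E-loop: cache hit or fill, then extend both result lists
def matchB_step (Bs : List (Int × String))
    (st : PySem.Dict String (List Int) × List (List Int) × List String)
    (p : Int × String) :
    PySem.Dict String (List Int) × List (List Int) × List String :=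
  let parts := pvParts p.2
  let key := PySem.List.pyGetD parts 0 ""
  let cv : PySem.Dict String (List Int) × List Int :=
    match st.1.get? key with
    | some v => (st.1, v)
    | none => (st.1.insert key (matchB_lookup Bs key), matchB_lookup Bs key)
  let t := PySem.List.pyGetD parts (-1) ""
  (cv.1, st.2.1 ++ cv.2.map (fun i => [i, p.1]), st.2.2 ++ cv.2.map (fun _ => t))

def matchB_sentence (Bn En : List String) : List String × List (List Int) :=
  let Bs := matchB_entries Bn
  let Es := matchB_entries En
  if Es.isEmpty then ([], [])
  else
    let r := Es.foldl (matchB_step Bs) (PySem.Dict.empty, [], [])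
    (r.2.2, r.2.1)

def match_entity_alt (B_label : List (List String)) (E_label : List (List String)) :
    List (List String) × List (List (List Int)) :=
  (((B_label.zip E_label).map (fun pn => matchB_sentence pn.1 pn.2))).unzip

-- ===== PRECONDITION & SPEC =====
def Spec_match_entity (B_label : List (List String)) (E_label : List (List String)) (out : List (List String) × List (List (List Int))) : Prop := out = match_entity_alt B_label E_label
instance (B_label : List (List String)) (E_label : List (List String)) (out : List (List String) × List (List (List Int))) : Decidable (Spec_match_entity B_label E_label out) := by unfold Spec_match_entity; infer_instance

-- ===== CLAIM (what is proved, stated in full; the proofs are below) =====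
def Claim_equal_match_entity : Prop := ∀ (B_label : List (List String)) (E_label : List (List String)), Dom_match_entity B_label E_label → Spec_match_entity B_label E_label (match_entity B_label E_label)

-- ===== LEMMAS AND PROOFS =====

-- generic shape of A's two-parallel-list collecting fold
lemma fold2_filter {P : Int × String → Bool} (l : List (Int × String))
    (xs : List String) (ys : List Int) :
    l.foldl (fun acc p => if P p then (acc.1 ++ [p.2], acc.2 ++ [p.1]) else acc) (xs, ys) =
      (xs ++ (l.filter P).map (·.2), ys ++ (l.filter P).map (·.1)) := by
  induction l generalizing xs ys with
  | nil => simp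
  | cons q l ih =>
    by_cases h : P q <;> simp [h, ih, List.append_assoc]

-- A's parallel-list collecting loop is the (labels, indices) unzip of B's filtered entry list
lemma collect_eq (node : List String) :
    matchA_collect node =
      ((matchB_entries node).map (·.2), (matchB_entries node).map (·.1)) := by
  unfold matchA_collect matchB_entries
  rw [fold2_filter]
  simp

-- A's inner B-rescan for one E entry appends exactly what B's memoized list produces
lemma inner_scan (Bs : List (Int × String)) (k t : String) (j : Int)
    (acc : List (List Int) × List String) :
    ((Bs.map (fun q => (q.2, q.1))).foldl
        (fun acc2 pb =>
          if PySem.Str.isIn k pb.1 then (acc2.1 ++ [[pb.2, j]], acc2.2 ++ [t]) else acc2)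
        acc) =
      (acc.1 ++ (matchB_lookup Bs k).map (fun i => [i, j]),
       acc.2 ++ (matchB_lookup Bs k).map (fun _ => t)) := by
  induction Bs generalizing acc with
  | nil => simp [matchB_lookup]
  | cons q Bs ih =>
    simp only [List.map_cons, List.foldl_cons]
    rw [ih]
    simp only [matchB_lookup, List.filter_cons, PySem.Str.isIn_eq]
    by_cases h : PySem.Chars.isIn k.toList q.2.toList <;> simp [h]

-- the common shape: one E entry contributes its memoized-lookup pairs to both lists
def canonStep (Bs : List (Int × String)) (acc : List (List Int) × List String)
    (pe : String × Int) : List (List Int) × List String :=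
  let corrent := pvParts pe.1
  (Bs.map (fun q => (q.2, q.1))).foldl
    (fun acc2 pb =>
      if PySem.Str.isIn (PySem.List.pyGetD corrent 0 "") pb.1 then
        (acc2.1 ++ [[pb.2, pe.2]], acc2.2 ++ [PySem.List.pyGetD corrent (-1) ""])
      else acc2)
    acc

-- B's cached E-loop carries the same two result lists as A's rescan loop, for any cache
-- whose every entry equals the uncached lookup
lemma loopE (Bs : List (Int × String)) (Es : List (Int × String))
    (d : PySem.Dict String (List Int))
    (hInv : ∀ k v, d.get? k = some v → v = matchB_lookup Bs k)
    (mi : List (List Int)) (mt : List String) :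
    (Es.foldl (matchB_step Bs) (d, mi, mt)).2 =
      (Es.map (fun p => (p.2, p.1))).foldl (canonStep Bs) (mi, mt) := by
  induction Es generalizing d mi mt with
  | nil => rfl
  | cons p Es ih =>
    simp only [List.foldl_cons, List.map_cons]
    have hcan : canonStep Bs (mi, mt) (p.2, p.1)
        = (mi ++ (matchB_lookup Bs (PySem.List.pyGetD (pvParts p.2) 0 "")).map
              (fun i => [i, p.1]),
           mt ++ (matchB_lookup Bs (PySem.List.pyGetD (pvParts p.2) 0 "")).map
              (fun _ => PySem.List.pyGetD (pvParts p.2) (-1) "")) := by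
      simp only [canonStep]
      exact inner_scan Bs _ _ p.1 (mi, mt)
    rw [hcan]
    cases h : d.get? (PySem.List.pyGetD (pvParts p.2) 0 "") with
    | some v =>
      have hstep : matchB_step Bs (d, mi, mt) p
          = (d, mi ++ v.map (fun i => [i, p.1]),
             mt ++ v.map (fun _ => PySem.List.pyGetD (pvParts p.2) (-1) "")) := by
        simp only [matchB_step, h]
      simp only [hstep]
      rw [ih d hInv]
      rw [← hInv _ _ h]
    | none =>
      have hstep : matchB_step Bs (d, mi, mt) p
          = (d.insert (PySem.List.pyGetD (pvParts p.2) 0 "")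
               (matchB_lookup Bs (PySem.List.pyGetD (pvParts p.2) 0 "")),
             mi ++ (matchB_lookup Bs (PySem.List.pyGetD (pvParts p.2) 0 "")).map
               (fun i => [i, p.1]),
             mt ++ (matchB_lookup Bs (PySem.List.pyGetD (pvParts p.2) 0 "")).map
               (fun _ => PySem.List.pyGetD (pvParts p.2) (-1) "")) := by
        simp only [matchB_step, h]
      simp only [hstep]
      rw [ih]
      intro k v hkv
      by_cases hk : k = PySem.List.pyGetD (pvParts p.2) 0 ""
      · rw [hk] at hkv
        rw [PySem.Dict.get?_insert_self] at hkv
        rw [hk]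
        exact (Option.some.inj hkv).symm
      · rw [PySem.Dict.get?_insert_of_ne _ _ hk] at hkv
        exact hInv _ _ hkv

lemma sentence_eq (Bn En : List String) :
    matchA_sentence Bn En = matchB_sentence Bn En := by
  unfold matchA_sentence matchB_sentence
  rw [collect_eq Bn, collect_eq En]
  by_cases h : matchB_entries En = []
  · simp [h]
  · have hlen : ((matchB_entries En).map (·.2)).length ≠ 0 := by simp [h]
    simp only [List.isEmpty_iff, h, if_neg hlen]
    rw [matchA_inner, List.zip_map', List.zip_map']
    rw [loopE _ _ _ (fun k v hkv => by simp [PySem.Dict.get?_empty] at hkv)]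
    rfl

-- A's outer two-append loop is the unzip of the per-sentence map
lemma outer_loop (l : List (List String × List String))
    (xs : List (List String)) (ys : List (List (List Int))) :
    (l.foldl (fun acc pn =>
        let s := matchA_sentence pn.1 pn.2
        (acc.1 ++ [s.1], acc.2 ++ [s.2])) (xs, ys)) =
      (xs ++ l.map (fun pn => (matchA_sentence pn.1 pn.2).1),
       ys ++ l.map (fun pn => (matchA_sentence pn.1 pn.2).2)) := by
  induction l generalizing xs ys with
  | nil => simp
  | cons pn l ih => simp [ih, List.append_assoc]

-- ===== VERDICT (by name: the statement is the Claim_ definition above) =====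
theorem match_entity_spec : Claim_equal_match_entity := by
  intro B_label E_label _
  unfold Spec_match_entity match_entity match_entity_alt
  rw [outer_loop]
  simp [List.unzip_eq_map, sentence_eq]
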